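-- pv_equiv track=rewrite | github.com/jhqiu1/Transit-warehouse | LLM4EO_CATL/DataProcess/CreateInitGroup.py | chooseLineBestTime
-- ===== SOURCE A (Python) =====
-- def chooseLineBestTime(availableTime, last_endTime, processTime):
--     startTimeList = []
--     endTimeList = []
--     lineBestTime = []
--     for num in range(len(availableTime)):
--         startTime = availableTime[num][0]
--         endTime = availableTime[num][1]
--         if startTime <= last_endTime and last_endTime + processTime < endTime:
--             startTimeList.append(last_endTime)
--             endTimeList.append(last_endTime + processTime)
--         elif num == len(availableTime) - 1:
--             if last_endTime >= startTime:
--                 startTimeList.append(last_endTime)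
--                 endTimeList.append(last_endTime + processTime)
--             else:
--                 startTimeList.append(startTime)
--                 endTimeList.append(startTime + processTime)
--     index = endTimeList.index(min(endTimeList))
--     lineBestTime.append(startTimeList[index])
--     lineBestTime.append(endTimeList[index])
--     return lineBestTime
-- ===== SOURCE B (Python) =====
-- def chooseLineBestTime(availableTime, last_endTime, processTime):
--     P = last_endTime + processTime
--     s_last = availableTime[-1][0]
--     if last_endTime < s_last and not any(
--             s <= last_endTime and P < e for s, e in availableTime):
--         return [s_last, s_last + processTime]
--     return [last_endTime, P]
-- ===== Notes on version B (the rewrite author's own statement) =====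
-- stated objective: simpler
-- what changed: A builds parallel candidate start/end lists over an index loop and then selects via endTimeList.index(min(...)); B observes that every in-window candidate equals (last_endTime, last_endTime+processTime), so it does one any() feasibility pass plus a look at the last slot and returns one of two closed-form answers with no candidate lists, no min and no index search.
import Mathlib
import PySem

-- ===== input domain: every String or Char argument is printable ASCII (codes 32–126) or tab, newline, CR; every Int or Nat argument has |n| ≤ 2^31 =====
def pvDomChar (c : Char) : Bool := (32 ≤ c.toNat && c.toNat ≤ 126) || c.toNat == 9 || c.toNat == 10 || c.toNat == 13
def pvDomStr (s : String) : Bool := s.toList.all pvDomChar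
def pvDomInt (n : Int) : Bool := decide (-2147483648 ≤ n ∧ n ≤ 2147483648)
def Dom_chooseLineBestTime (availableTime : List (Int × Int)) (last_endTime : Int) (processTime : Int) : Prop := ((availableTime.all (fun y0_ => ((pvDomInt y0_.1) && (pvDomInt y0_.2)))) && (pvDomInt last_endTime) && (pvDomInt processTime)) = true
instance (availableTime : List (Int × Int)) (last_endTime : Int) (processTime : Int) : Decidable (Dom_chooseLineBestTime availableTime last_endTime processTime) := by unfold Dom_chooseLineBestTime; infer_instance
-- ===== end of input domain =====

-- B replaces A's candidate-list building plus index(min(...)) selection by one any() feasibility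
-- pass and a closed-form two-way answer (objective: simpler). Equivalence is proved for nonempty
-- availableTime; on the empty list both Pythons raise (A: ValueError, B: IndexError).

-- ===== PORT A =====
-- loop body of A's 'for num in range(len(availableTime))', carrying (startTimeList, endTimeList)
def stepA (availableTime : List (Int × Int)) (last_endTime : Int) (processTime : Int)
    (acc : List Int × List Int) (num : Int) : List Int × List Int :=
  -- availableTime[num][0/1]: num is always in range here, so pyGetD's default is never used
  let startTime := (PySem.List.pyGetD availableTime num (0, 0)).1
  let endTime := (PySem.List.pyGetD availableTime num (0, 0)).2
  if startTime ≤ last_endTime ∧ last_endTime + processTime < endTime then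
    (acc.1 ++ [last_endTime], acc.2 ++ [last_endTime + processTime])
  else if num = (availableTime.length : Int) - 1 then
    if last_endTime ≥ startTime then
      (acc.1 ++ [last_endTime], acc.2 ++ [last_endTime + processTime])
    else
      (acc.1 ++ [startTime], acc.2 ++ [startTime + processTime])
  else acc

def chooseLineBestTime (availableTime : List (Int × Int)) (last_endTime : Int) (processTime : Int) : List Int :=
  let lists := (PySem.List.pyRange 0 (availableTime.length : Int) 1).foldl
    (stepA availableTime last_endTime processTime) ([], [])
  match PySem.List.min? lists.2 (fun x => x) with
  | none => []          -- min([]): ValueError, excluded by Pre_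
  | some m =>
    match PySem.List.index? lists.2 m with
    | none => []        -- unreachable: m ∈ lists.2
    | some index =>
      -- startTimeList[index], endTimeList[index]: index always in range
      [PySem.List.pyGetD lists.1 (index : Int) 0, PySem.List.pyGetD lists.2 (index : Int) 0]

-- ===== PORT B =====
def chooseLineBestTime_alt (availableTime : List (Int × Int)) (last_endTime : Int) (processTime : Int) : List Int :=
  let P := last_endTime + processTime
  match PySem.List.pyGet? availableTime (-1) with
  | none => []          -- availableTime[-1]: IndexError on empty, excluded by Pre_
  | some last =>
    if last_endTime < last.1 ∧
        ¬ (availableTime.any fun p => decide (p.1 ≤ last_endTime) && decide (P < p.2)) then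
      [last.1, last.1 + processTime]
    else [last_endTime, P]

-- ===== PRECONDITION & SPEC =====
-- Pre_ excludes only the empty availableTime, on which A raises ValueError (min of empty list).
def Pre_chooseLineBestTime (availableTime : List (Int × Int)) (last_endTime : Int) (processTime : Int) : Prop :=
  availableTime ≠ []
instance (availableTime : List (Int × Int)) (last_endTime : Int) (processTime : Int) : Decidable (Pre_chooseLineBestTime availableTime last_endTime processTime) := by unfold Pre_chooseLineBestTime; infer_instance

def pvWitness_chooseLineBestTime : (List (Int × Int)) × Int × Int := ([(0, 10)], 0, 2)

def Spec_chooseLineBestTime (availableTime : List (Int × Int)) (last_endTime : Int) (processTime : Int) (out : List Int) : Prop := out = chooseLineBestTime_alt availableTime last_endTime processTime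
instance (availableTime : List (Int × Int)) (last_endTime : Int) (processTime : Int) (out : List Int) : Decidable (Spec_chooseLineBestTime availableTime last_endTime processTime out) := by unfold Spec_chooseLineBestTime; infer_instance

-- ===== CLAIM (what is proved, stated in full; the proofs are below) =====
def Claim_equal_chooseLineBestTime : Prop := ∀ (availableTime : List (Int × Int)) (last_endTime : Int) (processTime : Int), Dom_chooseLineBestTime availableTime last_endTime processTime → Pre_chooseLineBestTime availableTime last_endTime processTime → Spec_chooseLineBestTime availableTime last_endTime processTime (chooseLineBestTime availableTime last_endTime processTime)

-- ===== LEMMAS AND PROOFS =====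

-- the qualifying test of A's first branch, as a Bool predicate on a slot
def qualB (L pt : Int) (p : Int × Int) : Bool := decide (p.1 ≤ L) && decide (L + pt < p.2)

-- A's selection step (min + index + lookups), factored for the proofs
def extractA (ls : List Int × List Int) : List Int :=
  match PySem.List.min? ls.2 (fun x => x) with
  | none => []
  | some m =>
    match PySem.List.index? ls.2 m with
    | none => []
    | some index => [PySem.List.pyGetD ls.1 (index : Int) 0, PySem.List.pyGetD ls.2 (index : Int) 0]

lemma chooseLineBestTime_eq_extract (xs : List (Int × Int)) (L pt : Int) :
    chooseLineBestTime xs L pt =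
      extractA ((PySem.List.pyRange 0 (xs.length : Int) 1).foldl (stepA xs L pt) ([], [])) := rfl

lemma foldl_min_replicate (P : Int) (k : Nat) : (List.replicate k P).foldl min P = P := by
  induction k with
  | zero => rfl
  | succ k ih => simp [List.replicate_succ, List.foldl_cons, min_self, ih]

lemma extract_rep (L P : Int) (k : Nat) (hk : 0 < k) :
    extractA (List.replicate k L, List.replicate k P) = [L, P] := by
  obtain ⟨j, rfl⟩ : ∃ j, k = j + 1 := ⟨k - 1, by omega⟩
  simp only [extractA, List.replicate_succ, PySem.List.min?_id_cons, foldl_min_replicate]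
  simp [PySem.List.index?, List.idxOf?_cons, PySem.List.pyGetD, PySem.List.pyGet?, PySem.List.pyIdx?]

lemma extract_single (s x : Int) : extractA ([s], [x]) = [s, x] := by
  simp [extractA, PySem.List.min?, PySem.List.index?, List.idxOf?_cons,
    PySem.List.pyGetD, PySem.List.pyGet?, PySem.List.pyIdx?]

lemma extract_rep_app (L P s x : Int) (k : Nat) (hk : 0 < k) (hPx : P < x) :
    extractA (List.replicate k L ++ [s], List.replicate k P ++ [x]) = [L, P] := by
  obtain ⟨j, rfl⟩ : ∃ j, k = j + 1 := ⟨k - 1, by omega⟩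
  simp only [extractA, List.replicate_succ, List.cons_append, PySem.List.min?_id_cons,
    List.foldl_append, foldl_min_replicate, List.foldl_cons, List.foldl_nil,
    min_eq_left (le_of_lt hPx)]
  simp [PySem.List.index?, List.idxOf?_cons, PySem.List.pyGetD, PySem.List.pyGet?,
    PySem.List.pyIdx?, show (0 : Int) ≤ (j : Int) + 1 by positivity]

-- state of A's loop after the first m iterations (all indices < len-1): k copies of (L, L+pt)
lemma foldA_prefix (xs : List (Int × Int)) (L pt : Int) (m : Nat) (h : m < xs.length) :
    (PySem.List.pyRange 0 (m : Int) 1).foldl (stepA xs L pt) ([], []) =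
      (List.replicate ((xs.take m).countP (qualB L pt)) L,
       List.replicate ((xs.take m).countP (qualB L pt)) (L + pt)) := by
  induction m with
  | zero => simp [PySem.List.pyRange_one_eq_nil]
  | succ m ih =>
    have hm : m < xs.length := by omega
    have hcast : ((m + 1 : Nat) : Int) = (m : Int) + 1 := by push_cast; ring
    rw [hcast, PySem.List.pyRange_one_succ_right (by positivity), List.foldl_append,
      ih hm, List.foldl_cons, List.foldl_nil]
    have hget : PySem.List.pyGetD xs (m : Int) ((0 : Int), (0 : Int)) = xs[m] := by
      rw [PySem.List.pyGetD_natCast]; exact List.getD_eq_getElem _ _ hm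
    have hne : ((m : Int)) ≠ (xs.length : Int) - 1 := by omega
    have htake : xs.take (m + 1) = xs.take m ++ [xs[m]] := (List.take_add_one ..).trans (by simp [hm])
    rw [stepA, hget]
    by_cases hq : xs[m].1 ≤ L ∧ L + pt < xs[m].2
    · have hqb : qualB L pt xs[m] = true := by simp [qualB, hq.1, hq.2]
      have hc : (xs.take (m + 1)).countP (qualB L pt) =
          (xs.take m).countP (qualB L pt) + 1 := by
        rw [htake, List.countP_append]
        simp only [List.countP_cons, List.countP_nil, hqb, if_true]
      rw [hc, List.replicate_succ', List.replicate_succ']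
      simp [hq]
    · have hqb : qualB L pt xs[m] = false := by
        simp only [qualB, Bool.and_eq_false_iff, decide_eq_false_iff_not]; tauto
      have hc : (xs.take (m + 1)).countP (qualB L pt) = (xs.take m).countP (qualB L pt) := by
        rw [htake, List.countP_append]
        simp [hqb]
      rw [hc]
      simp [hq, hne]

lemma pyGet_neg_one (xs : List (Int × Int)) (h : xs ≠ []) :
    PySem.List.pyGet? xs (-1) = some (xs[xs.length - 1]'(by
      have := List.length_pos_iff.mpr h; omega)) := by
  have hn : 0 < xs.length := List.length_pos_iff.mpr h
  simp only [PySem.List.pyGet?, PySem.List.pyIdx?]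
  have h1 : ¬ ((0 : Int) ≤ -1) := by omega
  have h2 : -(xs.length : Int) ≤ -1 := by omega
  simp [h2, List.getElem?_eq_getElem (by omega : xs.length - 1 < xs.length)]

-- the full loop: prefix invariant, then the special last iteration
lemma foldA_full (xs : List (Int × Int)) (L pt : Int) (h : xs ≠ []) :
    (PySem.List.pyRange 0 (xs.length : Int) 1).foldl (stepA xs L pt) ([], []) =
      stepA xs L pt
        (List.replicate ((xs.take (xs.length - 1)).countP (qualB L pt)) L,
         List.replicate ((xs.take (xs.length - 1)).countP (qualB L pt)) (L + pt))
        ((xs.length - 1 : Nat) : Int) := by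
  have hn : 0 < xs.length := List.length_pos_iff.mpr h
  have hcast : ((xs.length : Nat) : Int) = ((xs.length - 1 : Nat) : Int) + 1 := by omega
  rw [hcast, PySem.List.pyRange_one_succ_right (by positivity), List.foldl_append,
    foldA_prefix xs L pt (xs.length - 1) (by omega), List.foldl_cons, List.foldl_nil]

-- count of qualifying slots among all but the last ↔ any() over all, when the last cannot qualify
lemma countP_take_pos_iff (xs : List (Int × Int)) (L pt : Int) (h : xs ≠ [])
    (hlast : qualB L pt (xs[xs.length - 1]'(by have := List.length_pos_iff.mpr h; omega)) = false) :
    (0 < (xs.take (xs.length - 1)).countP (qualB L pt)) ↔ xs.any (qualB L pt) = true := by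
  have hn : 0 < xs.length := List.length_pos_iff.mpr h
  rw [List.countP_pos_iff]
  constructor
  · rintro ⟨a, ha, hq⟩
    exact List.any_eq_true.mpr ⟨a, List.mem_of_mem_take ha, hq⟩
  · rintro hx
    obtain ⟨a, ha, hq⟩ := List.any_eq_true.mp hx
    refine ⟨a, ?_, hq⟩
    obtain ⟨i, hi, rfl⟩ := List.mem_iff_getElem.mp ha
    have hine : i ≠ xs.length - 1 := by rintro rfl; rw [hlast] at hq; exact Bool.false_ne_true hq
    have : i < xs.length - 1 := by omega
    exact List.mem_take_iff_getElem.mpr ⟨i, by omega, by simp⟩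

-- ===== VERDICT (by name: the statement is the Claim_ definition above) =====
theorem chooseLineBestTime_spec : Claim_equal_chooseLineBestTime := by
  intro xs L pt _ hpre
  unfold Spec_chooseLineBestTime
  have hn : 0 < xs.length := List.length_pos_iff.mpr hpre
  have hlt : xs.length - 1 < xs.length := by omega
  have hget : PySem.List.pyGetD xs ((xs.length - 1 : Nat) : Int) ((0 : Int), (0 : Int)) =
      xs[xs.length - 1]'hlt := by
    rw [PySem.List.pyGetD_natCast]; exact List.getD_eq_getElem _ _ hlt
  have heq : ((xs.length - 1 : Nat) : Int) = (xs.length : Int) - 1 := by omega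
  have hB : chooseLineBestTime_alt xs L pt =
      if L < (xs[xs.length - 1]'hlt).1 ∧
          ¬ (xs.any fun p => decide (p.1 ≤ L) && decide (L + pt < p.2)) = true then
        [(xs[xs.length - 1]'hlt).1, (xs[xs.length - 1]'hlt).1 + pt]
      else [L, L + pt] := by
    simp only [chooseLineBestTime_alt, pyGet_neg_one xs hpre]
  rw [chooseLineBestTime_eq_extract, foldA_full xs L pt hpre, hB, stepA, hget]
  by_cases hQ : (xs[xs.length - 1]'hlt).1 ≤ L ∧ L + pt < (xs[xs.length - 1]'hlt).2
  · -- last slot qualifies for the first branch: all candidates equal (L, L+pt)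
    have hBc : ¬ (L < (xs[xs.length - 1]'hlt).1 ∧
        ¬ (xs.any fun p => decide (p.1 ≤ L) && decide (L + pt < p.2)) = true) := by
      rintro ⟨hL, _⟩; exact absurd hQ.1 (by omega)
    rw [if_pos hQ, ← List.replicate_succ', ← List.replicate_succ',
      extract_rep _ _ _ (Nat.succ_pos _), if_neg hBc]
  · rw [if_neg hQ, if_pos heq]
    by_cases hge : L ≥ (xs[xs.length - 1]'hlt).1
    · -- last slot does not qualify but starts no later than L: candidate is still (L, L+pt)
      have hBc : ¬ (L < (xs[xs.length - 1]'hlt).1 ∧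
          ¬ (xs.any fun p => decide (p.1 ≤ L) && decide (L + pt < p.2)) = true) := by
        rintro ⟨hL, _⟩; omega
      rw [if_pos hge, ← List.replicate_succ', ← List.replicate_succ',
        extract_rep _ _ _ (Nat.succ_pos _), if_neg hBc]
    · -- the last slot starts after L: the extra candidate is (last.1, last.1 + pt)
      rw [if_neg hge]
      have hLlt : L < (xs[xs.length - 1]'hlt).1 := by omega
      have hlastq : qualB L pt (xs[xs.length - 1]'hlt) = false := by
        simp only [qualB, Bool.and_eq_false_iff, decide_eq_false_iff_not]; left; omega
      have hanyeq : (xs.any fun p => decide (p.1 ≤ L) && decide (L + pt < p.2)) =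
          xs.any (qualB L pt) := rfl
      by_cases hk0 : (xs.take (xs.length - 1)).countP (qualB L pt) = 0
      · -- no earlier window fits either: A keeps only the shifted candidate
        have hany : xs.any (qualB L pt) = false := by
          rw [← Bool.not_eq_true]
          intro hx
          exact absurd ((countP_take_pos_iff xs L pt hpre hlastq).mpr hx) (by omega)
        rw [hk0]
        simp only [List.replicate_zero, List.nil_append]
        rw [extract_single, if_pos ⟨hLlt, by simp [hanyeq, hany]⟩]
      · -- some earlier window fits: its end L+pt < last.1+pt wins the min at the first index
        have hany : xs.any (qualB L pt) = true :=
          (countP_take_pos_iff xs L pt hpre hlastq).mp (Nat.pos_of_ne_zero hk0)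
        have hBc : ¬ (L < (xs[xs.length - 1]'hlt).1 ∧
            ¬ (xs.any fun p => decide (p.1 ≤ L) && decide (L + pt < p.2)) = true) := by
          rintro ⟨_, hno⟩; exact hno (by simp [hanyeq, hany])
        rw [extract_rep_app L (L + pt) (xs[xs.length - 1]'hlt).1 ((xs[xs.length - 1]'hlt).1 + pt)
          _ (Nat.pos_of_ne_zero hk0) (by omega), if_neg hBc]
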